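-- pv_equiv track=rewrite | github.com/larsgson/bible-story-builder | sort_cache_data.py | filter_dramatized_versions
-- ===== SOURCE A (Python) =====
-- from collections import defaultdict
--
-- def filter_dramatized_versions(filesets: list[str]) -> list[str]:
--     """
--     Filter out dramatized versions when non-dramatized version exists.
--
--     Dramatized check: Position -3 (third from end) == '2'
--     Non-dramatized: Position -3 == '1'
--
--     Example:
--         If both ENGWEBN1DA and ENGWEBN2DA exist, keep only ENGWEBN1DA
--
--     Args:
--         filesets: List of fileset IDs
--
--     Returns:
--         Filtered list with dramatized versions removed where non-dramatized exists
--     """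
--     # Group by base pattern (all except position -3)
--     base_groups = defaultdict(list)
--
--     for fs_id in filesets:
--         if len(fs_id) >= 3:
--             # Create base key: everything except position -3
--             base = fs_id[:-3] + fs_id[-2:]
--             base_groups[base].append(fs_id)
--
--     filtered = []
--     for base, fs_list in base_groups.items():
--         # Check for version 1 and version 2
--         has_version_1 = any(len(fs) >= 3 and fs[-3] == "1" for fs in fs_list)
--         version_2_ids = [fs for fs in fs_list if len(fs) >= 3 and fs[-3] == "2"]
--
--         if has_version_1 and version_2_ids:
--             # Keep only non-dramatized (version 1)
--             filtered.extend([fs for fs in fs_list if fs not in version_2_ids])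
--         else:
--             # Keep all
--             filtered.extend(fs_list)
--
--     return filtered
-- ===== SOURCE B (Python) =====
-- def filter_dramatized_versions(filesets: list[str]) -> list[str]:
--     """Same result, different plan: no grouping dict at all.  One pass records
--     the distinct base keys in first-seen order and the set of (long) ids
--     present; then, for each base in order, the input is rescanned and an id is
--     emitted unless it is dramatized ('2' at -3) and its literal non-dramatized
--     counterpart string (same id with '1' at -3) is present."""
--     bases = []            # distinct base keys, first-seen order
--     seen = set()
--     present = set()       # every id of length >= 3
--     for fs in filesets:
--         if len(fs) >= 3:
--             present.add(fs)
--             b = fs[:-3] + fs[-2:]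
--             if b not in seen:
--                 seen.add(b)
--                 bases.append(b)
--     out = []
--     for b in bases:
--         for fs in filesets:
--             if len(fs) >= 3 and fs[:-3] + fs[-2:] == b and \
--                not (fs[-3] == "2" and fs[:-3] + "1" + fs[-2:] in present):
--                 out.append(fs)
--     return out
-- ===== Notes on version B (the rewrite author's own statement) =====
-- stated objective: alternative
-- what changed: B drops A's grouping dict entirely: one pass records the distinct base keys in first-seen order and a set of the long ids present, then per base it rescans the input, keeping an id unless it is dramatized and its literal '1'-counterpart string is in the present-set; correct because all members of a base group have equal length and differ only at position -3, so the group's unique possible non-dramatized member is exactly fs[:-3]+'1'+fs[-2:].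
import Mathlib
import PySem

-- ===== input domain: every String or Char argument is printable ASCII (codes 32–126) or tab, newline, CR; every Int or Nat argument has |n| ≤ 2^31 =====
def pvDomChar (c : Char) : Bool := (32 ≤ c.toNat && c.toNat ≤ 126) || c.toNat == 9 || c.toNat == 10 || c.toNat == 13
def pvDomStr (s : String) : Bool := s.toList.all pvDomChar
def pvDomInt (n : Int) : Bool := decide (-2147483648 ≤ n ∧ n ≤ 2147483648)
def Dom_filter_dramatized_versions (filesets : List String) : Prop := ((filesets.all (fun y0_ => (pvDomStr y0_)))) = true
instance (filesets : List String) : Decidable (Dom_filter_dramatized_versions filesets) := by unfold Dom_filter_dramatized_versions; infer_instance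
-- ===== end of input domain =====

-- B removes A's grouping dict: one pass records the distinct base keys (first-seen order) and the
-- set of long ids present; emission rescans the input per base, dropping an id exactly when it is
-- dramatized and its literal '1'-counterpart string is present (objective: alternative).

-- base key: fs[:-3] + fs[-2:]  (the same Python expression appears in A and B)
def pvBase (fs : String) : List Char :=
  PySem.List.slice fs.toList none (some (-3)) ++ PySem.List.slice fs.toList (some (-2)) none

-- ===== PORT A =====
def filter_dramatized_versions (filesets : List String) : List String :=
  let base_groups : PySem.Dict (List Char) (List String) :=
    filesets.foldl (fun d fs_id =>
      if 3 ≤ PySem.Str.len fs_id then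
        d.modify (pvBase fs_id) [] (fun l => l ++ [fs_id])
      else d) PySem.Dict.empty
  base_groups.items.foldl (fun filtered p =>
    let has_version_1 := p.2.any (fun fs =>
      decide (3 ≤ PySem.Str.len fs) && (PySem.List.pyGet? fs.toList (-3) == some '1'))
    let version_2_ids := p.2.filter (fun fs =>
      decide (3 ≤ PySem.Str.len fs) && (PySem.List.pyGet? fs.toList (-3) == some '2'))
    if has_version_1 && !version_2_ids.isEmpty then
      filtered ++ p.2.filter (fun fs => !version_2_ids.contains fs)
    else
      filtered ++ p.2) []

-- ===== PORT B =====
-- counterpart id: fs[:-3] + "1" + fs[-2:]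
def pvCounterpart (fs : String) : String :=
  String.ofList (PySem.List.slice fs.toList none (some (-3)) ++ ['1']
                 ++ PySem.List.slice fs.toList (some (-2)) none)

def filter_dramatized_versions_alt (filesets : List String) : List String :=
  let st := filesets.foldl
    (fun (st : PySem.Set String × PySem.Set (List Char)) fs =>
      if 3 ≤ PySem.Str.len fs then
        (st.1.add fs, st.2.add (pvBase fs))
      else st) (PySem.Set.empty, PySem.Set.empty)
  st.2.foldl (fun out b =>
    filesets.foldl (fun out fs =>
      if 3 ≤ PySem.Str.len fs ∧ pvBase fs = b
         ∧ ¬((PySem.List.pyGet? fs.toList (-3) == some '2')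
             && st.1.contains (pvCounterpart fs)) = true then
        out ++ [fs]
      else out) out) []

-- ===== PRECONDITION & SPEC =====
def Spec_filter_dramatized_versions (filesets : List String) (out : List String) : Prop := out = filter_dramatized_versions_alt filesets
instance (filesets : List String) (out : List String) : Decidable (Spec_filter_dramatized_versions filesets out) := by unfold Spec_filter_dramatized_versions; infer_instance

-- ===== CLAIM (what is proved, stated in full; the proofs are below) =====
def Claim_equal_filter_dramatized_versions : Prop := ∀ (filesets : List String), Dom_filter_dramatized_versions filesets → Spec_filter_dramatized_versions filesets (filter_dramatized_versions filesets)

-- ===== LEMMAS AND PROOFS =====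

def pvP (fs : String) : Bool := decide (3 ≤ PySem.Str.len fs)
def pvC1 (fs : String) : Bool := PySem.List.pyGet? fs.toList (-3) == some '1'
def pvC2 (fs : String) : Bool := PySem.List.pyGet? fs.toList (-3) == some '2'

def pvDict (filesets : List String) : PySem.Dict (List Char) (List String) :=
  filesets.foldl (fun d fs_id =>
    if 3 ≤ PySem.Str.len fs_id then
      d.modify (pvBase fs_id) [] (fun l => l ++ [fs_id])
    else d) PySem.Dict.empty

def pvGroup (filesets : List String) (b : List Char) : List String :=
  filesets.filter (fun fs => pvP fs && (pvBase fs == b))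

def pvBases (filesets : List String) : PySem.Set (List Char) :=
  PySem.Set.ofList ((filesets.filter pvP).map pvBase)

def pvPresent (filesets : List String) : PySem.Set String :=
  PySem.Set.ofList (filesets.filter pvP)

-- ---------- char-level facts: a long id is u ++ c :: v with |v| = 2 ----------

theorem pv_drop_mid (u v : List Char) (c : Char) : List.drop (u.length + 1) (u ++ c :: v) = v := by
  rw [show u.length + 1 = (u ++ [c]).length by simp,
      show u ++ c :: v = (u ++ [c]) ++ v by simp]
  exact List.drop_left

theorem pv_split (l : List Char) (h : 3 ≤ l.length) :
    ∃ u c v, l = u ++ c :: v ∧ v.length = 2 := by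
  refine ⟨l.take (l.length - 3), l[l.length - 3]'(by omega), l.drop (l.length - 2), ?_,
    by simp; omega⟩
  conv_lhs => rw [← List.take_append_drop (l.length - 3) l]
  congr 1
  rw [List.drop_eq_getElem_cons (by omega)]
  congr 2
  omega

theorem pv_base_split (u : List Char) (c : Char) (v : List Char) (hv : v.length = 2) (fs : String)
    (hfs : fs.toList = u ++ c :: v) : pvBase fs = u ++ v := by
  unfold pvBase
  rw [PySem.List.slice_to_neg_ofNat fs.toList 3 (by omega),
      PySem.List.slice_from_neg_ofNat fs.toList 2 (by omega), hfs]
  have h1 : (u ++ c :: v).length - 3 = u.length := by simp [hv]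
  have h2 : (u ++ c :: v).length - 2 = u.length + 1 := by simp [hv]
  rw [h1, h2, pv_drop_mid, List.take_append_of_le_length (by omega), List.take_length]

theorem pv_cp_split (u : List Char) (c : Char) (v : List Char) (hv : v.length = 2) (fs : String)
    (hfs : fs.toList = u ++ c :: v) : (pvCounterpart fs).toList = u ++ '1' :: v := by
  unfold pvCounterpart
  rw [PySem.List.slice_to_neg_ofNat fs.toList 3 (by omega),
      PySem.List.slice_from_neg_ofNat fs.toList 2 (by omega), hfs]
  have h1 : (u ++ c :: v).length - 3 = u.length := by simp [hv]
  have h2 : (u ++ c :: v).length - 2 = u.length + 1 := by simp [hv]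
  rw [h1, h2, pv_drop_mid, List.take_append_of_le_length (by omega), List.take_length]
  simp

theorem pv_c1_split (u : List Char) (c : Char) (v : List Char) (hv : v.length = 2) (fs : String)
    (hfs : fs.toList = u ++ c :: v) : pvC1 fs = (c == '1') := by
  unfold pvC1
  simp only [PySem.List.pyGet?, PySem.List.pyIdx?, hfs]
  have hl : (u ++ c :: v).length = u.length + 3 := by simp [hv]
  rw [hl]
  have : (u.length + 3 : Int) + -3 = u.length := by omega
  norm_num [this]
  rw [List.getElem?_append_right (by omega)]
  simp

theorem pv_p_split (u : List Char) (c : Char) (v : List Char) (hv : v.length = 2) (fs : String)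
    (hfs : fs.toList = u ++ c :: v) : pvP fs = true := by
  simp [pvP, PySem.Str.len_eq, hfs, hv]

theorem pv_p_iff (fs : String) : pvP fs = true ↔ 3 ≤ fs.toList.length := by
  simp [pvP, PySem.Str.len_eq]

-- the counterpart of a long id is a long id with the same base and '1' at position -3
theorem pv_cp_props (fs : String) (h : 3 ≤ fs.toList.length) :
    pvP (pvCounterpart fs) = true
    ∧ pvBase (pvCounterpart fs) = pvBase fs
    ∧ pvC1 (pvCounterpart fs) = true := by
  obtain ⟨u, c, v, hfs, hv⟩ := pv_split fs.toList h
  have hcp := pv_cp_split u c v hv fs hfs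
  exact ⟨pv_p_split u '1' v hv _ hcp,
    by rw [pv_base_split u '1' v hv _ hcp, pv_base_split u c v hv fs hfs],
    by rw [pv_c1_split u '1' v hv _ hcp]; rfl⟩

-- a long id with the same base as fs and '1' at -3 IS fs's counterpart
theorem pv_cp_unique (fs g : String) (hf : 3 ≤ fs.toList.length) (hg : 3 ≤ g.toList.length)
    (hb : pvBase g = pvBase fs) (h1 : pvC1 g = true) : g = pvCounterpart fs := by
  obtain ⟨u, c, v, hfs, hv⟩ := pv_split fs.toList hf
  obtain ⟨u', c', v', hgs, hv'⟩ := pv_split g.toList hg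
  rw [pv_base_split u c v hv fs hfs, pv_base_split u' c' v' hv' g hgs] at hb
  obtain ⟨hu, hvv⟩ := List.append_inj' hb (by omega)
  rw [pv_c1_split u' c' v' hv' g hgs] at h1
  have hc' : c' = '1' := by simpa using h1
  apply String.toList_inj.mp
  rw [pv_cp_split u c v hv fs hfs, hgs, hu, hvv, hc']

-- ---------- the grouping dict of A ----------

theorem pvDict_eq (filesets : List String) :
    pvDict filesets =
      ((filesets.filter pvP).map (fun fs => (pvBase fs, fs))).foldl
        (fun d p => d.modify p.1 [] (fun l => l ++ [p.2])) PySem.Dict.empty := by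
  rw [List.foldl_map, List.foldl_filter]
  unfold pvDict
  apply PySem.List.foldl_congr_mem
  intro acc x _
  simp [pvP]

theorem pvDict_getD (filesets : List String) (b : List Char) :
    (pvDict filesets).getD b [] = pvGroup filesets b := by
  rw [pvDict_eq, PySem.Dict.getD_foldl_modify_append]
  simp only [List.filter_map, pvGroup, Function.comp_def, List.filter_filter,
    PySem.Dict.getD_empty, List.map_map, List.nil_append]
  rw [List.map_id']
  exact List.filter_congr (fun x _ => Bool.and_comm _ _)

theorem pvDict_nodup_keys (filesets : List String) : (pvDict filesets).keys.Nodup := by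
  rw [pvDict_eq]
  exact PySem.Dict.nodup_keys_foldl_modify_key _ _ _ _ _ (by simp)

theorem pvDict_keys (filesets : List String) : (pvDict filesets).keys = pvBases filesets := by
  rw [pvDict_eq]
  have := PySem.Dict.keys_foldl_modify_key
    ((filesets.filter pvP).map (fun fs => (pvBase fs, fs))) Prod.fst []
    (fun _ p => fun l => l ++ [p.2]) PySem.Dict.empty
  rw [this]
  simp only [PySem.Dict.keys_empty, List.map_map, Function.comp_def]
  rw [pvBases, PySem.Set.ofList_eq_foldl]
  rfl

-- ---------- A's per-group branch is a single filter ----------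

theorem pvGroupStep (l : List String) (acc : List String) :
    (if ((l.any (fun fs => pvP fs && pvC1 fs))
        && !(l.filter (fun fs => pvP fs && pvC2 fs)).isEmpty) = true then
      acc ++ l.filter (fun fs => !(l.filter (fun fs => pvP fs && pvC2 fs)).contains fs)
    else acc ++ l)
    = acc ++ l.filter (fun fs => !(pvP fs && pvC2 fs && l.any (fun g => pvP g && pvC1 g))) := by
  by_cases h1 : (l.any (fun fs => pvP fs && pvC1 fs)) = true
  · have hR : l.filter (fun fs => !(pvP fs && pvC2 fs && l.any (fun g => pvP g && pvC1 g)))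
        = l.filter (fun fs => !(pvP fs && pvC2 fs)) := by
      apply List.filter_congr
      intro a _
      simp [h1]
    rw [hR]
    by_cases h2 : (l.filter (fun fs => pvP fs && pvC2 fs)).isEmpty = true
    · rw [if_neg (by simp [h1, h2])]
      have hfe : l.filter (fun fs => !(pvP fs && pvC2 fs)) = l := by
        rw [List.filter_eq_self]
        intro a ha
        have h := List.filter_eq_nil_iff.mp (List.isEmpty_iff.mp h2) a ha
        cases hq : (pvP a && pvC2 a)
        · simp
        · exact absurd hq h
      rw [hfe]
    · rw [if_pos (by simp [h1, h2])]
      congr 1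
      apply List.filter_congr
      intro fs hfs
      have hc : (l.filter (fun fs => pvP fs && pvC2 fs)).contains fs = (pvP fs && pvC2 fs) := by
        rw [Bool.eq_iff_iff]
        simp [List.mem_filter, hfs]
      rw [hc]
  · have h1' : l.any (fun fs => pvP fs && pvC1 fs) = false := by simpa using h1
    rw [if_neg (by simp [h1'])]
    have hfe : l.filter (fun fs => !(pvP fs && pvC2 fs && l.any (fun g => pvP g && pvC1 g))) = l := by
      rw [List.filter_eq_self]
      intro a _
      simp [h1']
    rw [hfe]

-- ---------- group-has-a-'1'-member ↔ counterpart present ----------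

theorem pv_hasOne_iff (filesets : List String) (fs : String) (hp : pvP fs = true) :
    (pvGroup filesets (pvBase fs)).any (fun g => pvP g && pvC1 g)
      = (pvPresent filesets).contains (pvCounterpart fs) := by
  have hf : 3 ≤ fs.toList.length := (pv_p_iff fs).mp hp
  rw [Bool.eq_iff_iff, PySem.Set.contains_iff, pvPresent, PySem.Set.mem_ofList,
    List.any_eq_true]
  simp only [pvGroup, List.mem_filter, Bool.and_eq_true, beq_iff_eq]
  constructor
  · rintro ⟨g, ⟨hm, _, hb⟩, hpg, h1⟩
    have hg : 3 ≤ g.toList.length := (pv_p_iff g).mp hpg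
    rw [← pv_cp_unique fs g hf hg hb h1]
    exact ⟨hm, hpg⟩
  · intro hm
    obtain ⟨hm, hpcp⟩ := hm
    obtain ⟨hpc, hb, h1⟩ := pv_cp_props fs hf
    exact ⟨pvCounterpart fs, ⟨hm, hpc, hb⟩, hpc, h1⟩

-- ---------- B's first pass ----------

theorem pvBfold (filesets : List String) (s1 : PySem.Set String) (s2 : PySem.Set (List Char)) :
    filesets.foldl
      (fun (st : PySem.Set String × PySem.Set (List Char)) fs =>
        if 3 ≤ PySem.Str.len fs then (st.1.add fs, st.2.add (pvBase fs)) else st) (s1, s2)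
    = (filesets.foldl (fun s fs => if 3 ≤ PySem.Str.len fs then s.add fs else s) s1,
       filesets.foldl (fun s fs => if 3 ≤ PySem.Str.len fs then s.add (pvBase fs) else s) s2) := by
  induction filesets generalizing s1 s2 with
  | nil => rfl
  | cons x xs ih =>
    simp only [List.foldl_cons]
    by_cases h : 3 ≤ PySem.Str.len x
    · simp only [if_pos h]; exact ih _ _
    · simp only [if_neg h]; exact ih _ _

theorem pvBfold_present (filesets : List String) :
    filesets.foldl (fun s fs => if 3 ≤ PySem.Str.len fs then s.add fs else s) PySem.Set.empty
      = pvPresent filesets := by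
  rw [PySem.List.foldl_ite_eq_foldl_filter]
  rw [pvPresent, PySem.Set.ofList_eq_foldl]
  rfl

theorem pvBfold_bases (filesets : List String) :
    filesets.foldl (fun s fs => if 3 ≤ PySem.Str.len fs then s.add (pvBase fs) else s)
      PySem.Set.empty = pvBases filesets := by
  rw [PySem.List.foldl_ite_eq_foldl_filter]
  rw [pvBases, PySem.Set.ofList_eq_foldl, List.foldl_map]
  rfl

-- ---------- the per-base equality ----------

theorem pv_perBase (filesets : List String) (b : List Char) :
    (pvGroup filesets b).filter
        (fun fs => !(pvP fs && pvC2 fs && (pvGroup filesets b).any (fun g => pvP g && pvC1 g)))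
    = filesets.filter (fun fs =>
        decide (3 ≤ PySem.Str.len fs ∧ pvBase fs = b
          ∧ ¬(pvC2 fs && (pvPresent filesets).contains (pvCounterpart fs)) = true)) := by
  set anyb := (pvGroup filesets b).any (fun g => pvP g && pvC1 g) with hanyb
  rw [pvGroup, List.filter_filter]
  apply List.filter_congr
  intro fs hm
  by_cases hp : pvP fs = true
  · by_cases hb : pvBase fs = b
    · subst hb
      have hone : anyb = (pvPresent filesets).contains (pvCounterpart fs) := by
        rw [hanyb]
        exact pv_hasOne_iff filesets fs hp
      have hlenN : 3 ≤ fs.length := by simpa [pvP, PySem.Str.len_eq] using hp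
      rw [Bool.eq_iff_iff]
      simp [hp, hone, hlenN]
    · have hb' : (pvBase fs == b) = false := by simpa using hb
      rw [Bool.eq_iff_iff]
      simp [hb, hb']
  · have hp' : pvP fs = false := by simpa using hp
    have hlenN : ¬(3 ≤ fs.length) := by simpa [pvP, PySem.Str.len_eq] using hp
    rw [Bool.eq_iff_iff]
    simp [hp', hlenN]

-- ===== VERDICT (by name: the statement is the Claim_ definition above) =====
theorem filter_dramatized_versions_spec : Claim_equal_filter_dramatized_versions := by
  intro filesets _
  unfold Spec_filter_dramatized_versions
  show filter_dramatized_versions filesets = filter_dramatized_versions_alt filesets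
  simp only [filter_dramatized_versions, filter_dramatized_versions_alt]
  rw [pvBfold, pvBfold_present, pvBfold_bases]
  have hd : (filesets.foldl (fun d fs_id =>
      if 3 ≤ PySem.Str.len fs_id then
        d.modify (pvBase fs_id) [] (fun l => l ++ [fs_id])
      else d) PySem.Dict.empty) = pvDict filesets := rfl
  rw [hd]
  rw [PySem.Dict.items_eq_map_keys (pvDict filesets) (pvDict_nodup_keys filesets) []]
  rw [List.foldl_map, pvDict_keys]
  apply PySem.List.foldl_congr_mem
  intro acc b hb
  dsimp only
  rw [pvDict_getD]
  have hA := pvGroupStep (pvGroup filesets b) acc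
  simp only [pvP, pvC1, pvC2] at hA
  rw [hA]
  rw [PySem.List.foldl_append_ite_eq_filter
    (p := fun fs => 3 ≤ PySem.Str.len fs ∧ pvBase fs = b
      ∧ ¬((PySem.List.pyGet? fs.toList (-3) == some '2')
          && (pvPresent filesets).contains (pvCounterpart fs)) = true)]
  congr 1
  have := pv_perBase filesets b
  simp only [pvP, pvC1, pvC2] at this
  exact this
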